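-- pv_equiv track=rewrite | github.com/matheus-fsc/knight-tour-visualizer | cavalo_engine.py | mandatory_by_degree_propagation
-- ===== SOURCE A (Python) =====
-- def mandatory_by_degree_propagation(nodes, adj, edges):
--     """Propagação de restrições do 2-fator: cada casa precisa de exatamente
--     2 arestas incidentes ativas. Casas de grau 2 (cantos) forçam ambas as
--     arestas. Cascata: se uma casa tem só 2 incidentes ainda livres e k
--     obrigatórias (k ≤ 2), as livres viram obrigatórias; se já tem 2
--     obrigatórias, as demais ficam proibidas.
--     """
--     edge_set = {tuple(sorted([u, v])) for u, v in edges}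
--     status = {e: 'unknown' for e in edge_set}
--     incident = {n: [e for e in edge_set if n in e] for n in nodes}
--
--     changed = True
--     while changed:
--         changed = False
--         for n in nodes:
--             mand = [e for e in incident[n] if status[e] == 'mandatory']
--             unk = [e for e in incident[n] if status[e] == 'unknown']
--             if len(mand) == 2 and unk:
--                 for e in unk:
--                     status[e] = 'forbidden'
--                     changed = True
--             elif len(unk) == 2 - len(mand) and unk:
--                 for e in unk:
--                     status[e] = 'mandatory'
--                     changed = True
--
--     mandatory = sorted(e for e in edge_set if status[e] == 'mandatory')
--     forbidden = sorted(e for e in edge_set if status[e] == 'forbidden')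
--     return mandatory, forbidden
-- ===== SOURCE B (Python) =====
-- def mandatory_by_degree_propagation(nodes, adj, edges):
--     """Worklist propagation: instead of re-sweeping every node until a full
--     pass makes no change, keep a pending set of nodes whose incident statuses
--     may have changed; only pending nodes are examined (O(1) count checks), and
--     deciding an edge re-queues just its endpoints."""
--     seen = set()
--     norm = []                       # distinct normalized edges, in order
--     for u, v in edges:
--         e = (u, v) if u <= v else (v, u)
--         if e not in seen:
--             seen.add(e)
--             norm.append(e)
--
--     node_set = set(nodes)
--     inc = {n: [] for n in nodes}    # incidence lists, one scan over the edges
--     for e in norm: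
--         u, v = e
--         if u in node_set:
--             inc[u].append(e)
--         if v != u and v in node_set:
--             inc[v].append(e)
--
--     st = {e: 0 for e in norm}       # 0 unknown, 1 mandatory, 2 forbidden
--     ucnt = {n: len(inc[n]) for n in nodes}
--     mcnt = {n: 0 for n in nodes}
--
--     pending = set(nodes)
--     while pending:
--         for n in nodes:
--             if n not in pending:
--                 continue
--             pending.discard(n)
--             if ucnt[n] == 0:
--                 continue
--             mark = 2 if mcnt[n] == 2 else (1 if ucnt[n] == 2 - mcnt[n] else 0)
--             if mark == 0:
--                 continue
--             for e in [e for e in inc[n] if st[e] == 0]: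
--                 st[e] = mark
--                 u, v = e
--                 if u in node_set:
--                     ucnt[u] -= 1
--                     if mark == 1:
--                         mcnt[u] += 1
--                     pending.add(u)
--                 if v != u and v in node_set:
--                     ucnt[v] -= 1
--                     if mark == 1:
--                         mcnt[v] += 1
--                     pending.add(v)
--
--     mandatory = sorted(e for e in norm if st[e] == 1)
--     forbidden = sorted(e for e in norm if st[e] == 2)
--     return mandatory, forbidden
-- ===== Notes on version B (the rewrite author's own statement) =====
-- stated objective: faster
-- what changed: A repeatedly sweeps every node and re-filters its incident edges from the status dict until a whole pass changes nothing; B is a worklist propagation: a pending set holds only the nodes whose incident statuses may have changed, non-pending nodes are skipped with an O(1) check on maintained per-node mandatory/unknown counters, and deciding an edge re-queues just its two endpoints (incidence lists are built in one edge scan instead of one scan per node).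
import Mathlib
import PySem

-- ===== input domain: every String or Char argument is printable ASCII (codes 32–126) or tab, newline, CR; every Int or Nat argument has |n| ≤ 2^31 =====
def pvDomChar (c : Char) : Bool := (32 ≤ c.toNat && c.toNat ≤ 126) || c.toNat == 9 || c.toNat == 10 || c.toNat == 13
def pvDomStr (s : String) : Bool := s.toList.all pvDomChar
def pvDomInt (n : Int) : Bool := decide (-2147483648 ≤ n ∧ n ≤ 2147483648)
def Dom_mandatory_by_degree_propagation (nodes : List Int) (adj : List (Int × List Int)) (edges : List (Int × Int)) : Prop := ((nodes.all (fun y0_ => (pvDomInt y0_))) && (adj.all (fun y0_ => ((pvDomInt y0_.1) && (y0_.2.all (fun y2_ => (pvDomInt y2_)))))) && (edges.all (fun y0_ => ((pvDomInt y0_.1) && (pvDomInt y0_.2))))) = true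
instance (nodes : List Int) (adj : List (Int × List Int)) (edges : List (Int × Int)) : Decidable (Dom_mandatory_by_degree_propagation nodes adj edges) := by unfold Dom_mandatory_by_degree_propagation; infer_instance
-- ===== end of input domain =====

-- B replaces A's repeated full-sweep fixpoint loop by a worklist: a pending set of
-- nodes whose incident statuses may have changed; only pending nodes are examined
-- (an O(1) check on maintained per-node mandatory/unknown counters), and deciding
-- an edge re-queues just its endpoints. Both return values only; neither Python
-- mutates its arguments.

-- ===== PORT A =====
-- tuple(sorted([u, v]))
def pvNorm (u v : Int) : Int × Int := if u ≤ v then (u, v) else (v, u)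

-- the body of A's `for n in nodes:` loop; state = (status dict, changed flag)
def pvNodeA (incident : PySem.Dict Int (List (Int × Int)))
    (s : PySem.Dict (Int × Int) String × Bool) (n : Int) :
    PySem.Dict (Int × Int) String × Bool :=
  let inc := incident.getD n []                            -- incident[n] (key always present)
  let mand := inc.filter (fun e => s.1.getD e "" == "mandatory")
  let unk := inc.filter (fun e => s.1.getD e "" == "unknown")
  if mand.length == 2 && !unk.isEmpty then
    unk.foldl (fun t e => (t.1.insert e "forbidden", true)) s
  else if (unk.length : Int) == 2 - (mand.length : Int) && !unk.isEmpty then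
    unk.foldl (fun t e => (t.1.insert e "mandatory", true)) s
  else s

-- one round of A's `while changed:` loop
def pvPassA (incident : PySem.Dict Int (List (Int × Int))) (nodes : List Int)
    (s : PySem.Dict (Int × Int) String × Bool) : PySem.Dict (Int × Int) String × Bool :=
  nodes.foldl (pvNodeA incident) s

-- A's while-loop; fuel is only a totality guard: each continuing round flips at
-- least one of at most edges.length edges, so edges.length + 1 rounds suffice.
def pvLoopA (incident : PySem.Dict Int (List (Int × Int))) (nodes : List Int) :
    Nat → PySem.Dict (Int × Int) String → PySem.Dict (Int × Int) String
  | 0, st => st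
  | fuel + 1, st =>
    let r := pvPassA incident nodes (st, false)
    if r.2 then pvLoopA incident nodes fuel r.1 else r.1

-- A iterates its edge SET only where the result is order-independent (dict builds,
-- filters whose flips are set-wide, and final sorted()); ported in insertion order.
def mandatory_by_degree_propagation (nodes : List Int) (adj : List (Int × List Int))
    (edges : List (Int × Int)) : (List (Int × Int)) × (List (Int × Int)) :=
  let edge_set : PySem.Set (Int × Int) := PySem.Set.ofList (edges.map (fun p => pvNorm p.1 p.2))
  let status : PySem.Dict (Int × Int) String :=
    edge_set.foldl (fun d e => d.insert e "unknown") PySem.Dict.empty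
  let incident : PySem.Dict Int (List (Int × Int)) :=
    nodes.foldl (fun d n => d.insert n (edge_set.filter (fun e => e.1 == n || e.2 == n)))
      PySem.Dict.empty
  let stF := pvLoopA incident nodes (edges.length + 1) status
  (PySem.List.sorted2 (edge_set.filter (fun e => stF.getD e "" == "mandatory")) (fun e => e.1) (fun e => e.2),
   PySem.List.sorted2 (edge_set.filter (fun e => stF.getD e "" == "forbidden")) (fun e => e.1) (fun e => e.2))

-- ===== PORT B =====
-- `ucnt[x] -= 1` / `mcnt[x] += 1` at the two endpoints of a decided edge e
-- (Source B's nested `if mark == 1:` is carried as the `ok` guard so the dicts of the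
-- decide loop can be threaded componentwise)
def pvBump (ok : Bool) (δ : Int) (ns : PySem.Set Int) (d : PySem.Dict Int Int)
    (e : Int × Int) : PySem.Dict Int Int :=
  let d1 := if ok && ns.contains e.1 then d.insert e.1 (d.getD e.1 0 + δ) else d
  if ok && (!(e.2 == e.1) && ns.contains e.2) then d1.insert e.2 (d1.getD e.2 0 + δ) else d1

-- `pending.add(x)` at the two endpoints of a decided edge (same guards as the bumps)
def pvPAdd (ns : PySem.Set Int) (P : PySem.Set Int) (e : Int × Int) : PySem.Set Int :=
  let P1 := if ns.contains e.1 then PySem.Set.add P e.1 else P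
  if !(e.2 == e.1) && ns.contains e.2 then PySem.Set.add P1 e.2 else P1

-- body of Source B's `for e in [...]:` decide loop; state = (st, ucnt, mcnt, pending)
def pvStepB (ns : PySem.Set Int) (mark : Int)
    (s : PySem.Dict (Int × Int) Int × PySem.Dict Int Int × PySem.Dict Int Int × PySem.Set Int)
    (e : Int × Int) :
    PySem.Dict (Int × Int) Int × PySem.Dict Int Int × PySem.Dict Int Int × PySem.Set Int :=
  (s.1.insert e mark, pvBump true (-1) ns s.2.1 e, pvBump (mark == 1) 1 ns s.2.2.1 e,
   pvPAdd ns s.2.2.2 e)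

-- body of Source B's `for n in nodes:` scan: skip non-pending nodes, discard, decide
def pvNodeB (inc : PySem.Dict Int (List (Int × Int))) (ns : PySem.Set Int)
    (s : PySem.Dict (Int × Int) Int × PySem.Dict Int Int × PySem.Dict Int Int × PySem.Set Int)
    (n : Int) :
    PySem.Dict (Int × Int) Int × PySem.Dict Int Int × PySem.Dict Int Int × PySem.Set Int :=
  if s.2.2.2.contains n then                               -- if n not in pending: continue
    let P1 := PySem.Set.discard s.2.2.2 n                  -- pending.discard(n)
    if s.2.1.getD n 0 == 0 then (s.1, s.2.1, s.2.2.1, P1)  -- if ucnt[n] == 0: continue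
    else
      let mark : Int :=
        if s.2.2.1.getD n 0 == 2 then 2
        else if s.2.1.getD n 0 == 2 - s.2.2.1.getD n 0 then 1
        else 0
      if mark == 0 then (s.1, s.2.1, s.2.2.1, P1)
      else ((inc.getD n []).filter (fun e => s.1.getD e 0 == 0)).foldl (pvStepB ns mark)
        (s.1, s.2.1, s.2.2.1, P1)
  else s

-- one `for n in nodes:` scan of Source B's `while pending:` loop
def pvPassB (inc : PySem.Dict Int (List (Int × Int))) (ns : PySem.Set Int) (nodes : List Int)
    (s : PySem.Dict (Int × Int) Int × PySem.Dict Int Int × PySem.Dict Int Int × PySem.Set Int) :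
    PySem.Dict (Int × Int) Int × PySem.Dict Int Int × PySem.Dict Int Int × PySem.Set Int :=
  nodes.foldl (pvNodeB inc ns) s

-- Source B's `while pending:` loop; fuel is only a totality guard: a scan either decides
-- an edge (≤ edges.length times in total) or empties the pending set.
def pvLoopB (inc : PySem.Dict Int (List (Int × Int))) (ns : PySem.Set Int) (nodes : List Int) :
    Nat → PySem.Dict (Int × Int) Int × PySem.Dict Int Int × PySem.Dict Int Int × PySem.Set Int →
    PySem.Dict (Int × Int) Int × PySem.Dict Int Int × PySem.Dict Int Int × PySem.Set Int
  | 0, t => t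
  | fuel + 1, t =>
    if t.2.2.2.isEmpty then t else pvLoopB inc ns nodes fuel (pvPassB inc ns nodes t)

def mandatory_by_degree_propagation_alt (nodes : List Int) (adj : List (Int × List Int))
    (edges : List (Int × Int)) : (List (Int × Int)) × (List (Int × Int)) :=
  -- seen/norm loop: ordered dedup of the normalized edges (norm is the Set's list)
  let norm : PySem.Set (Int × Int) :=
    edges.foldl (fun s p => PySem.Set.add s (pvNorm p.1 p.2)) PySem.Set.empty
  let ns : PySem.Set Int := PySem.Set.ofList nodes
  let half : List (Int × (Int × Int)) :=
    norm.foldl (fun h e =>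
      let h' := if ns.contains e.1 then h ++ [(e.1, e)] else h
      if !(e.2 == e.1) && ns.contains e.2 then h' ++ [(e.2, e)] else h') []
  let inc0 : PySem.Dict Int (List (Int × Int)) :=
    nodes.foldl (fun d n => d.insert n []) PySem.Dict.empty
  -- inc[x].append(e): key x always present, so modify's default [] is never used
  let inc := half.foldl (fun d p => d.modify p.1 [] (fun l => l ++ [p.2])) inc0
  let st0 : PySem.Dict (Int × Int) Int := norm.foldl (fun d e => d.insert e 0) PySem.Dict.empty
  let uc0 : PySem.Dict Int Int :=
    nodes.foldl (fun d n => d.insert n ((inc.getD n []).length : Int)) PySem.Dict.empty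
  let mc0 : PySem.Dict Int Int := nodes.foldl (fun d n => d.insert n 0) PySem.Dict.empty
  let P0 : PySem.Set Int := PySem.Set.ofList nodes
  let t := pvLoopB inc ns nodes (edges.length + 1) (st0, uc0, mc0, P0)
  (PySem.List.sorted2 (norm.filter (fun e => t.1.getD e 0 == 1)) (fun e => e.1) (fun e => e.2),
   PySem.List.sorted2 (norm.filter (fun e => t.1.getD e 0 == 2)) (fun e => e.1) (fun e => e.2))

-- ===== PRECONDITION & SPEC =====
def Spec_mandatory_by_degree_propagation (nodes : List Int) (adj : List (Int × List Int)) (edges : List (Int × Int)) (out : (List (Int × Int)) × (List (Int × Int))) : Prop := out = mandatory_by_degree_propagation_alt nodes adj edges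
instance (nodes : List Int) (adj : List (Int × List Int)) (edges : List (Int × Int)) (out : (List (Int × Int)) × (List (Int × Int))) : Decidable (Spec_mandatory_by_degree_propagation nodes adj edges out) := by unfold Spec_mandatory_by_degree_propagation; infer_instance

-- ===== CLAIM (what is proved, stated in full; the proofs are below) =====
def Claim_equal_mandatory_by_degree_propagation : Prop := ∀ (nodes : List Int) (adj : List (Int × List Int)) (edges : List (Int × Int)), Dom_mandatory_by_degree_propagation nodes adj edges → Spec_mandatory_by_degree_propagation nodes adj edges (mandatory_by_degree_propagation nodes adj edges)

-- ===== LEMMAS AND PROOFS =====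

-- the incident edges of node m, as both implementations see them
def pvInc (E : List (Int × Int)) (m : Int) : List (Int × Int) :=
  E.filter (fun e => e.1 == m || e.2 == m)

-- node n is a no-op for A's rules under status sa
def pvNoop (E : List (Int × Int)) (sa : PySem.Dict (Int × Int) String) (n : Int) : Prop :=
  ((pvInc E n).filter (fun e => sa.getD e "" == "unknown")) = []
  ∨ (((pvInc E n).filter (fun e => sa.getD e "" == "mandatory")).length ≠ 2
     ∧ (((pvInc E n).filter (fun e => sa.getD e "" == "unknown")).length : Int)
        ≠ 2 - (((pvInc E n).filter (fun e => sa.getD e "" == "mandatory")).length : Int))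

-- simulation invariant between A's status dict and B's (st, ucnt, mcnt)
def pvInv (E : List (Int × Int)) (allN : List Int)
    (sa : PySem.Dict (Int × Int) String) (sb : PySem.Dict (Int × Int) Int)
    (uc mc : PySem.Dict Int Int) : Prop :=
  (∀ e ∈ E, (sa.getD e "" = "unknown" ∧ sb.getD e 0 = 0)
          ∨ (sa.getD e "" = "mandatory" ∧ sb.getD e 0 = 1)
          ∨ (sa.getD e "" = "forbidden" ∧ sb.getD e 0 = 2)) ∧
  (∀ n ∈ allN,
      uc.getD n 0 = (((pvInc E n).filter (fun e => sa.getD e "" == "unknown")).length : Int)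
    ∧ mc.getD n 0 = (((pvInc E n).filter (fun e => sa.getD e "" == "mandatory")).length : Int))

-- full relation between A's and B's loop states
def pvRel (E : List (Int × Int)) (allN : List Int)
    (sa : PySem.Dict (Int × Int) String) (sb : PySem.Dict (Int × Int) Int)
    (uc mc : PySem.Dict Int Int) (P : PySem.Set Int) : Prop :=
  pvInv E allN sa sb uc mc
  ∧ (∀ m ∈ allN, m ∉ P → pvNoop E sa m)
  ∧ (∀ x ∈ P, x ∈ allN)

theorem pv_getD_foldl_insert_fn {κ ν : Type} [BEq κ] [LawfulBEq κ] (f : κ → ν) (l : List κ)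
    (d : PySem.Dict κ ν) (y : κ) (d0 : ν) :
    (l.foldl (fun d x => d.insert x (f x)) d).getD y d0 = if y ∈ l then f y else d.getD y d0 := by
  induction l generalizing d with
  | nil => simp
  | cons a t ih =>
    simp only [List.foldl_cons, ih, List.mem_cons]
    by_cases hy : y ∈ t
    · simp [hy]
    · by_cases hya : y = a
      · subst hya; simp [hy, PySem.Dict.getD_insert_self]
      · simp [hy, hya, PySem.Dict.getD_insert_of_ne _ _ _ hya]

theorem pv_getD_foldl_insert_const {κ ν : Type} [BEq κ] [LawfulBEq κ] (v : ν) (l : List κ)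
    (d : PySem.Dict κ ν) (y : κ) (d0 : ν) :
    (l.foldl (fun d x => d.insert x v) d).getD y d0 = if y ∈ l then v else d.getD y d0 :=
  pv_getD_foldl_insert_fn (fun _ => v) l d y d0

theorem pv_foldl_pair_true {κ ν : Type} [BEq κ] (v : ν) (l : List κ)
    (a : PySem.Dict κ ν) (c : Bool) :
    l.foldl (fun t e => (t.1.insert e v, true)) (a, c)
      = (l.foldl (fun d e => d.insert e v) a, c || !l.isEmpty) := by
  induction l generalizing a c with
  | nil => simp
  | cons x t ih => simp [ih]

theorem pvStepB_foldl (ns : PySem.Set Int) (mark : Int) (l : List (Int × Int))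
    (st : PySem.Dict (Int × Int) Int) (uc mc : PySem.Dict Int Int) (P : PySem.Set Int) :
    l.foldl (pvStepB ns mark) (st, uc, mc, P) =
      (l.foldl (fun d e => d.insert e mark) st,
       l.foldl (pvBump true (-1) ns) uc,
       l.foldl (pvBump (mark == 1) 1 ns) mc,
       l.foldl (pvPAdd ns) P) := by
  induction l generalizing st uc mc P with
  | nil => rfl
  | cons x t ih => simp [pvStepB, ih]

theorem pv_getD_pvBump (ok : Bool) (δ : Int) (ns : PySem.Set Int) (d : PySem.Dict Int Int)
    (e : Int × Int) (m : Int) (hm : ns.contains m = true) :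
    (pvBump ok δ ns d e).getD m 0 =
      d.getD m 0 + (if ok && (e.1 == m || e.2 == m) then δ else 0) := by
  cases ok with
  | false => simp [pvBump]
  | true =>
    by_cases h1 : e.1 = m <;> by_cases h2 : e.2 = m
    -- e.1 = m, e.2 = m : self-loop at m
    · have h21 : e.2 = e.1 := by rw [h1, h2]
      simp_all [pvBump, PySem.Dict.getD_insert_self]
    -- e.1 = m, e.2 ≠ m
    · have h2m : ¬ m = e.2 := fun h => h2 h.symm
      have h21 : ¬ e.2 = e.1 := by rw [h1]; exact h2
      by_cases hc2 : ns.contains e.2 = true <;>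
        simp_all [pvBump, PySem.Dict.getD_insert_self, PySem.Dict.getD_insert_of_ne _ _ _ h2m]
    -- e.1 ≠ m, e.2 = m
    · have h1m : ¬ m = e.1 := fun h => h1 h.symm
      have h21 : ¬ e.2 = e.1 := by rw [h2]; exact fun h => h1 h.symm
      by_cases hc1 : ns.contains e.1 = true <;>
        simp_all [pvBump, PySem.Dict.getD_insert_self, PySem.Dict.getD_insert_of_ne _ _ _ h1m]
    -- neither endpoint is m
    · have h1m : ¬ m = e.1 := fun h => h1 h.symm
      have h2m : ¬ m = e.2 := fun h => h2 h.symm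
      by_cases hc1 : ns.contains e.1 = true <;> by_cases hc2 : ns.contains e.2 = true <;>
        by_cases h21 : e.2 = e.1 <;>
        simp_all [pvBump, PySem.Dict.getD_insert_of_ne _ _ _ h1m,
          PySem.Dict.getD_insert_of_ne _ _ _ h2m]

theorem pv_getD_foldl_pvBump (ok : Bool) (δ : Int) (ns : PySem.Set Int) (l : List (Int × Int))
    (d : PySem.Dict Int Int) (m : Int) (hm : ns.contains m = true) :
    (l.foldl (pvBump ok δ ns) d).getD m 0 =
      d.getD m 0 + (if ok then δ * (l.countP (fun e => e.1 == m || e.2 == m) : Int) else 0) := by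
  induction l generalizing d with
  | nil => simp
  | cons x t ih =>
    simp only [List.foldl_cons, ih, pv_getD_pvBump ok δ ns d x m hm, List.countP_cons]
    by_cases hok : ok = true <;> by_cases hx : (x.1 == m || x.2 == m) = true <;>
      · simp [hok, hx]
        try ring

-- membership in the pending set after the decide loop's adds
theorem pv_mem_foldl_pAdd (ns : PySem.Set Int) (l : List (Int × Int)) (P : PySem.Set Int)
    (x : Int) :
    x ∈ l.foldl (pvPAdd ns) P ↔
      x ∈ P ∨ ∃ e ∈ l, (e.1 = x ∨ e.2 = x) ∧ ns.contains x = true := by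
  induction l generalizing P with
  | nil => simp
  | cons a t ih =>
    simp only [List.foldl_cons, ih, List.mem_cons]
    have hstep : x ∈ pvPAdd ns P a ↔
        x ∈ P ∨ ((a.1 = x ∨ a.2 = x) ∧ ns.contains x = true) := by
      unfold pvPAdd
      by_cases h1 : a.1 = x <;> by_cases h2 : a.2 = x <;>
        by_cases hc1 : ns.contains a.1 = true <;> by_cases hc2 : ns.contains a.2 = true <;>
        by_cases h21 : a.2 = a.1 <;>
        simp_all [PySem.Set.mem_add] <;> tauto
    rw [hstep]
    constructor
    · rintro (⟨h | h⟩ | ⟨e, he, hx⟩)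
      · exact Or.inl h
      · exact Or.inr ⟨a, Or.inl rfl, h⟩
      · exact Or.inr ⟨e, Or.inr he, hx⟩
    · rintro (h | ⟨e, (rfl | he), hx⟩)
      · exact Or.inl (Or.inl h)
      · exact Or.inl (Or.inr hx)
      · exact Or.inr ⟨e, he, hx⟩

theorem pv_countP_sub {α : Type} (E : List α) (p q : α → Bool)
    (h : ∀ e ∈ E, q e = true → p e = true) :
    E.countP p = E.countP (fun e => p e && !q e) + E.countP q := by
  induction E with
  | nil => simp
  | cons x t ih =>
    have hx := h x (by simp)
    have iht := ih (fun e he => h e (List.mem_cons_of_mem x he))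
    simp only [List.countP_cons]
    by_cases hq : q x = true <;> by_cases hp : p x = true <;> simp_all <;> omega

theorem pv_countP_or {α : Type} (E : List α) (p q : α → Bool)
    (h : ∀ e ∈ E, ¬(p e = true ∧ q e = true)) :
    E.countP (fun e => p e || q e) = E.countP p + E.countP q := by
  induction E with
  | nil => simp
  | cons x t ih =>
    have hx := h x (by simp)
    have iht := ih (fun e he => h e (List.mem_cons_of_mem x he))
    simp only [List.countP_cons]
    by_cases hq : q x = true <;> by_cases hp : p x = true <;> simp_all <;> omega

-- the counting core: flipping all currently-unknown incident edges of n to v / mark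
-- preserves the invariant
theorem pv_inv_update (E : List (Int × Int)) (allN : List Int) (ns : PySem.Set Int)
    (hns : ns = PySem.Set.ofList allN)
    (sa : PySem.Dict (Int × Int) String) (sb : PySem.Dict (Int × Int) Int)
    (uc mc : PySem.Dict Int Int) (n : Int)
    (hI : pvInv E allN sa sb uc mc)
    (v : String) (mark : Int)
    (hvm : (v = "forbidden" ∧ mark = 2) ∨ (v = "mandatory" ∧ mark = 1)) :
    pvInv E allN
      (((pvInc E n).filter (fun e => sa.getD e "" == "unknown")).foldl (fun d e => d.insert e v) sa)
      (((pvInc E n).filter (fun e => sa.getD e "" == "unknown")).foldl (fun d e => d.insert e mark) sb)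
      (((pvInc E n).filter (fun e => sa.getD e "" == "unknown")).foldl (pvBump true (-1) ns) uc)
      (((pvInc E n).filter (fun e => sa.getD e "" == "unknown")).foldl (pvBump (mark == 1) 1 ns) mc) := by
  obtain ⟨h1, h2⟩ := hI
  set unk := (pvInc E n).filter (fun e => sa.getD e "" == "unknown") with hunk
  have hvne : (v == "unknown") = false := by
    rcases hvm with ⟨hv, _⟩ | ⟨hv, _⟩ <;> subst hv <;> decide
  have hmem : ∀ e, e ∈ unk ↔ e ∈ E ∧ (e.1 == n || e.2 == n) = true ∧ sa.getD e "" = "unknown" := by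
    intro e
    rw [hunk]
    simp [pvInc, List.mem_filter]
    tauto
  have hFa : ∀ y, (unk.foldl (fun d e => d.insert e v) sa).getD y "" =
      if y ∈ unk then v else sa.getD y "" := fun y => pv_getD_foldl_insert_const v unk sa y ""
  have hFb : ∀ y, (unk.foldl (fun d e => d.insert e mark) sb).getD y 0 =
      if y ∈ unk then mark else sb.getD y 0 := fun y => pv_getD_foldl_insert_const mark unk sb y 0
  constructor
  · -- clause 1
    intro e he
    rw [hFa, hFb]
    by_cases hmm : e ∈ unk
    · rcases hvm with ⟨hv, hmk⟩ | ⟨hv, hmk⟩ <;> subst hv <;> subst hmk <;> simp [hmm]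
    · simp only [if_neg hmm]
      exact h1 e he
  · -- clause 2
    intro m hm'
    have hcm : ns.contains m = true := by
      subst hns; exact List.contains_iff_mem.mpr ((PySem.Set.mem_ofList allN m).mpr hm')
    have hlen : ∀ (q : (Int × Int) → Bool),
        (((pvInc E m).filter q).length : Int) = (E.countP (fun e => q e && (e.1 == m || e.2 == m)) : Int) := by
      intro q
      simp [pvInc, ← List.countP_eq_length_filter]
    have hcnt : unk.countP (fun e => e.1 == m || e.2 == m)
        = E.countP (fun e => ((e.1 == m || e.2 == m) && (sa.getD e "" == "unknown")) && (e.1 == n || e.2 == n)) := by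
      rw [hunk]
      simp [pvInc, List.countP_filter]
      apply List.countP_congr
      intro e _
      constructor <;> (intro h; simp_all)
    have hUC : (unk.foldl (pvBump true (-1) ns) uc).getD m 0 =
        uc.getD m 0 + (-1) * (unk.countP (fun e => e.1 == m || e.2 == m) : Int) := by
      rw [pv_getD_foldl_pvBump true (-1) ns unk uc m hcm]; simp
    have hsub : E.countP (fun e => (sa.getD e "" == "unknown") && (e.1 == m || e.2 == m))
        = E.countP (fun e => ((sa.getD e "" == "unknown") && (e.1 == m || e.2 == m)) &&
            !(((e.1 == m || e.2 == m) && (sa.getD e "" == "unknown")) && (e.1 == n || e.2 == n)))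
          + E.countP (fun e => ((e.1 == m || e.2 == m) && (sa.getD e "" == "unknown")) && (e.1 == n || e.2 == n)) := by
      apply pv_countP_sub
      intro e _ h
      simp_all
    have hnewU : E.countP (fun e => ((unk.foldl (fun d e => d.insert e v) sa).getD e "" == "unknown") && (e.1 == m || e.2 == m))
        = E.countP (fun e => ((sa.getD e "" == "unknown") && (e.1 == m || e.2 == m)) &&
            !(((e.1 == m || e.2 == m) && (sa.getD e "" == "unknown")) && (e.1 == n || e.2 == n))) := by
      apply List.countP_congr
      intro e he
      rw [hFa]
      by_cases hmm : e ∈ unk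
      · obtain ⟨-, hPn, hU⟩ := (hmem e).mp hmm
        simp [hmm, hvne, hPn, hU]
        tauto
      · have hq : ¬ ((e.1 == n || e.2 == n) = true ∧ sa.getD e "" = "unknown") := by
          intro ⟨ha, hb⟩; exact hmm ((hmem e).mpr ⟨he, ha, hb⟩)
        simp only [if_neg hmm]
        by_cases hU : sa.getD e "" = "unknown"
        · have hPn : (e.1 == n || e.2 == n) = false := by
            rcases Bool.eq_false_or_eq_true (e.1 == n || e.2 == n) with h | h
            · exact absurd ⟨h, hU⟩ hq
            · exact h
          simp [hU, hPn]
        · simp [hU]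
    -- unknown-count equation
    have hunkcount : (unk.foldl (pvBump true (-1) ns) uc).getD m 0 =
        (((pvInc E m).filter (fun e => (unk.foldl (fun d e => d.insert e v) sa).getD e "" == "unknown")).length : Int) := by
      rw [hUC, hlen, hnewU, (h2 m hm').1, hlen, hcnt]
      push_cast [hsub]
      ring
    refine ⟨hunkcount, ?_⟩
    rcases hvm with ⟨hv, hmk⟩ | ⟨hv, hmk⟩
    · -- forbidden: mandatory counts unchanged
      subst hv; subst hmk
      have : ((2 : Int) == 1) = false := by decide
      rw [this, pv_getD_foldl_pvBump false 1 ns unk mc m hcm]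
      simp only [if_neg (by simp : ¬ (false = true)), add_zero]
      rw [(h2 m hm').2, hlen, hlen]
      congr 1
      apply List.countP_congr
      intro e he
      rw [hFa]
      by_cases hmm : e ∈ unk
      · obtain ⟨-, hPn, hU⟩ := (hmem e).mp hmm
        simp [hmm, hU]
      · simp [hmm]
    · -- mandatory: counts grow by the number of flipped incident edges
      subst hv; subst hmk
      have : ((1 : Int) == 1) = true := by decide
      rw [this, pv_getD_foldl_pvBump true 1 ns unk mc m hcm]
      rw [(h2 m hm').2, hlen, hlen, hcnt]
      have hor : E.countP (fun e => ((unk.foldl (fun d e => d.insert e "mandatory") sa).getD e "" == "mandatory") && (e.1 == m || e.2 == m))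
          = E.countP (fun e => ((sa.getD e "" == "mandatory") && (e.1 == m || e.2 == m))
              || (((e.1 == m || e.2 == m) && (sa.getD e "" == "unknown")) && (e.1 == n || e.2 == n))) := by
        apply List.countP_congr
        intro e he
        rw [hFa]
        by_cases hmm : e ∈ unk
        · obtain ⟨-, hPn, hU⟩ := (hmem e).mp hmm
          simp [hmm, hPn, hU]
        · have hq : ¬ ((e.1 == n || e.2 == n) = true ∧ sa.getD e "" = "unknown") := by
            intro ⟨ha, hb⟩; exact hmm ((hmem e).mpr ⟨he, ha, hb⟩)
          simp only [if_neg hmm]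
          by_cases hU : sa.getD e "" = "unknown"
          · have hPn : (e.1 == n || e.2 == n) = false := by
              rcases Bool.eq_false_or_eq_true (e.1 == n || e.2 == n) with h | h
              · exact absurd ⟨h, hU⟩ hq
              · exact h
            simp [hU, hPn]
          · simp [hU]
      have hdisj : E.countP (fun e => ((sa.getD e "" == "mandatory") && (e.1 == m || e.2 == m))
              || (((e.1 == m || e.2 == m) && (sa.getD e "" == "unknown")) && (e.1 == n || e.2 == n)))
          = E.countP (fun e => (sa.getD e "" == "mandatory") && (e.1 == m || e.2 == m))
            + E.countP (fun e => ((e.1 == m || e.2 == m) && (sa.getD e "" == "unknown")) && (e.1 == n || e.2 == n)) := by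
        apply pv_countP_or
        intro e he ⟨ha, hb⟩
        simp_all
      rw [hor, hdisj]
      simp

-- a no-op node leaves A's fold state untouched
theorem pvNodeA_noop (E : List (Int × Int)) (incA : PySem.Dict Int (List (Int × Int)))
    (sa : PySem.Dict (Int × Int) String) (c : Bool) (n : Int)
    (hIA : incA.getD n [] = pvInc E n) (h : pvNoop E sa n) :
    pvNodeA incA (sa, c) n = (sa, c) := by
  unfold pvNodeA
  rw [hIA]
  rcases h with h | ⟨h1, h2⟩
  · simp [h]
  · have hm2 : (((pvInc E n).filter (fun e => sa.getD e "" == "mandatory")).length == 2) = false := by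
      simp [h1]
    have hu2 : ((((pvInc E n).filter (fun e => sa.getD e "" == "unknown")).length : Int)
        == 2 - (((pvInc E n).filter (fun e => sa.getD e "" == "mandatory")).length : Int)) = false := by
      simp [h2]
    simp [hm2, hu2]

-- if every node is a no-op, A's whole pass is the identity
theorem pvPassA_noop (E : List (Int × Int)) (incA : PySem.Dict Int (List (Int × Int)))
    (l : List Int) (sa : PySem.Dict (Int × Int) String) (c : Bool)
    (hIA : ∀ n ∈ l, incA.getD n [] = pvInc E n)
    (h : ∀ n ∈ l, pvNoop E sa n) :
    l.foldl (pvNodeA incA) (sa, c) = (sa, c) := by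
  induction l with
  | nil => rfl
  | cons x t ih =>
    simp only [List.foldl_cons]
    rw [pvNodeA_noop E incA sa c x (hIA x (by simp)) (h x (by simp))]
    exact ih (fun n hn => hIA n (List.mem_cons_of_mem x hn))
      (fun n hn => h n (List.mem_cons_of_mem x hn))

-- a noop survives any status update that does not touch the node's incident edges
theorem pvNoop_congr (E : List (Int × Int)) (sa sa' : PySem.Dict (Int × Int) String) (m : Int)
    (h : ∀ e ∈ pvInc E m, sa'.getD e "" = sa.getD e "") (hn : pvNoop E sa m) :
    pvNoop E sa' m := by
  have hf : ∀ w : String, (pvInc E m).filter (fun e => sa'.getD e "" == w)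
      = (pvInc E m).filter (fun e => sa.getD e "" == w) := by
    intro w
    apply List.filter_congr
    intro e he
    rw [h e he]
  unfold pvNoop
  rw [hf "unknown", hf "mandatory"]
  exact hn

-- an incident edge has the node as an endpoint
theorem pv_pvInc_endpoint (E : List (Int × Int)) (m : Int) (e : Int × Int)
    (h : e ∈ pvInc E m) : e.1 = m ∨ e.2 = m := by
  unfold pvInc at h
  have := List.of_mem_filter h
  simpa using this

-- one node of the scan: the relation is preserved; if A's flag stays false, the
-- pending set only shrank (and lost n)
theorem pv_node_sim (E : List (Int × Int)) (allN : List Int) (ns : PySem.Set Int)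
    (incA incB : PySem.Dict Int (List (Int × Int)))
    (hns : ns = PySem.Set.ofList allN)
    (hIA : ∀ n ∈ allN, incA.getD n [] = pvInc E n)
    (hIB : ∀ n ∈ allN, incB.getD n [] = pvInc E n)
    (n : Int) (hn : n ∈ allN)
    (sa : PySem.Dict (Int × Int) String) (sb : PySem.Dict (Int × Int) Int)
    (uc mc : PySem.Dict Int Int) (P : PySem.Set Int) (c : Bool)
    (hR : pvRel E allN sa sb uc mc P) :
    pvRel E allN (pvNodeA incA (sa, c) n).1 (pvNodeB incB ns (sb, uc, mc, P) n).1
        (pvNodeB incB ns (sb, uc, mc, P) n).2.1 (pvNodeB incB ns (sb, uc, mc, P) n).2.2.1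
        (pvNodeB incB ns (sb, uc, mc, P) n).2.2.2
    ∧ ((pvNodeA incA (sa, c) n).2 = false →
        c = false ∧ ∀ x ∈ (pvNodeB incB ns (sb, uc, mc, P) n).2.2.2, x ∈ P ∧ x ≠ n) := by
  obtain ⟨⟨h1, h2⟩, hNoop, hPsub⟩ := hR
  have hcontains : ∀ m ∈ allN, ns.contains m = true := by
    intro m hm
    rw [hns]
    exact List.contains_iff_mem.mpr ((PySem.Set.mem_ofList allN m).mpr hm)
  by_cases hPn : P.contains n = true
  · -- n is pending: B processes it, with the same decision as A
    have hPmem : n ∈ P := List.mem_of_elem_eq_true hPn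
    have huc : uc.getD n 0 = (((pvInc E n).filter (fun e => sa.getD e "" == "unknown")).length : Int) := (h2 n hn).1
    have hmc : mc.getD n 0 = (((pvInc E n).filter (fun e => sa.getD e "" == "mandatory")).length : Int) := (h2 n hn).2
    have hUnkEq : (pvInc E n).filter (fun e => sb.getD e 0 == 0)
        = (pvInc E n).filter (fun e => sa.getD e "" == "unknown") := by
      apply List.filter_congr
      intro e he
      have heE : e ∈ E := List.mem_of_mem_filter he
      rcases h1 e heE with ⟨ha, hb⟩ | ⟨ha, hb⟩ | ⟨ha, hb⟩ <;> simp [ha, hb]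
    simp only [pvNodeA, pvNodeB, hIA n hn, hIB n hn, huc, hmc, hUnkEq]
    rw [if_pos hPn]
    set unk := (pvInc E n).filter (fun e => sa.getD e "" == "unknown") with hunkdef
    set mand := (pvInc E n).filter (fun e => sa.getD e "" == "mandatory") with hmanddef
    set P1 := PySem.Set.discard P n with hP1
    have hP1mem : ∀ x, x ∈ P1 ↔ x ∈ P ∧ x ≠ n := fun x => PySem.Set.mem_discard P n x
    by_cases hU : unk = []
    · -- ucnt[n] == 0: both sides do nothing (B only discards n)
      have hU0 : ((unk.length : Int) == 0) = true := by simp [hU]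
      rw [if_pos hU0]
      have hA1 : (mand.length == 2 && !unk.isEmpty) = false := by simp [hU]
      have hA2 : ((unk.length : Int) == 2 - (mand.length : Int) && !unk.isEmpty) = false := by
        simp [hU]
      rw [if_neg (by simp [hA1]), if_neg (by simp [hA2])]
      refine ⟨⟨⟨h1, h2⟩, ?_, ?_⟩, ?_⟩
      · intro m hm hmP
        by_cases hmn : m = n
        · subst hmn; exact Or.inl hU
        · exact hNoop m hm (fun hmem => hmP ((hP1mem m).mpr ⟨hmem, hmn⟩))
      · intro x hx; exact hPsub x ((hP1mem x).mp hx).1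
      · intro hc; exact ⟨hc, fun x hx => (hP1mem x).mp hx⟩
    · have hpos : 0 < unk.length := List.length_pos_of_ne_nil hU
      have hUlen : ¬ (((unk.length : Int) == 0) = true) := by simp; omega
      rw [if_neg hUlen]
      have hne : !unk.isEmpty = true := by simp [hU]
      by_cases hM : mand.length = 2
      · -- forbidden branch fires on both sides
        have hc1 : (mand.length == 2 && !unk.isEmpty) = true := by simp [hM, hU]
        have hmark : (if (((mand.length : Int)) == 2) = true then (2:Int)
            else if (((unk.length : Int)) == 2 - (mand.length : Int)) = true then 1 else 0) = 2 := by
          simp [hM]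
        rw [if_pos hc1, hmark]
        rw [if_neg (by decide : ¬ (((2:Int) == 0) = true))]
        rw [pv_foldl_pair_true, pvStepB_foldl]
        have hInv' := pv_inv_update E allN ns hns sa sb uc mc n ⟨h1, h2⟩ "forbidden" 2 (Or.inl ⟨rfl, rfl⟩)
        refine ⟨⟨hInv', ?_, ?_⟩, ?_⟩
        · -- noop outside the new pending set
          intro m hm hmP'
          rw [pv_mem_foldl_pAdd] at hmP'
          push_neg at hmP'
          obtain ⟨hmP1, hmE⟩ := hmP'
          have hmn : m ≠ n := by
            rintro rfl
            obtain ⟨e, he⟩ := List.exists_mem_of_ne_nil unk hU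
            have heInc : e ∈ pvInc E m := List.mem_of_mem_filter he
            exact hmE e he (pv_pvInc_endpoint E m e heInc) (hcontains m hm)
          have hmP : m ∉ P := fun hmem => hmP1 ((hP1mem m).mpr ⟨hmem, hmn⟩)
          refine pvNoop_congr E sa _ m ?_ (hNoop m hm hmP)
          intro e he
          rw [pv_getD_foldl_insert_const]
          have : e ∉ unk := by
            intro heu
            exact hmE e heu (pv_pvInc_endpoint E m e he) (hcontains m hm)
          simp [this]
        · intro x hx
          rw [pv_mem_foldl_pAdd] at hx
          rcases hx with hx | ⟨e, he, hx, hcx⟩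
          · exact hPsub x ((hP1mem x).mp hx).1
          · rw [hns] at hcx
            exact (PySem.Set.mem_ofList allN x).mp (List.contains_iff_mem.mp hcx)
        · intro hfalse
          simp [List.isEmpty_iff, hU] at hfalse
      · by_cases hM2 : (unk.length : Int) = 2 - (mand.length : Int)
        · -- mandatory branch fires on both sides
          have hc1 : ¬ (mand.length == 2 && !unk.isEmpty) = true := by simp [hM]
          have hc2 : ((unk.length : Int) == 2 - (mand.length : Int) && !unk.isEmpty) = true := by
            simp [hM2, hU]
          have hmark : (if (((mand.length : Int)) == 2) = true then (2:Int)
              else if (((unk.length : Int)) == 2 - (mand.length : Int)) = true then 1 else 0) = 1 := by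
            have : ¬ ((mand.length : Int) = 2) := by omega
            simp [this, hM2]
          rw [if_neg hc1, if_pos hc2, hmark]
          rw [if_neg (by decide : ¬ (((1:Int) == 0) = true))]
          rw [pv_foldl_pair_true, pvStepB_foldl]
          have hInv' := pv_inv_update E allN ns hns sa sb uc mc n ⟨h1, h2⟩ "mandatory" 1 (Or.inr ⟨rfl, rfl⟩)
          refine ⟨⟨hInv', ?_, ?_⟩, ?_⟩
          · intro m hm hmP'
            rw [pv_mem_foldl_pAdd] at hmP'
            push_neg at hmP'
            obtain ⟨hmP1, hmE⟩ := hmP'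
            have hmn : m ≠ n := by
              rintro rfl
              obtain ⟨e, he⟩ := List.exists_mem_of_ne_nil unk hU
              have heInc : e ∈ pvInc E m := List.mem_of_mem_filter he
              exact hmE e he (pv_pvInc_endpoint E m e heInc) (hcontains m hm)
            have hmP : m ∉ P := fun hmem => hmP1 ((hP1mem m).mpr ⟨hmem, hmn⟩)
            refine pvNoop_congr E sa _ m ?_ (hNoop m hm hmP)
            intro e he
            rw [pv_getD_foldl_insert_const]
            have : e ∉ unk := by
              intro heu
              exact hmE e heu (pv_pvInc_endpoint E m e he) (hcontains m hm)
            simp [this]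
          · intro x hx
            rw [pv_mem_foldl_pAdd] at hx
            rcases hx with hx | ⟨e, he, hx, hcx⟩
            · exact hPsub x ((hP1mem x).mp hx).1
            · rw [hns] at hcx
              exact (PySem.Set.mem_ofList allN x).mp (List.contains_iff_mem.mp hcx)
          · intro hfalse
            simp [List.isEmpty_iff, hU] at hfalse
        · -- no rule fires: B only discards n, A does nothing and n becomes a noop
          have hc1 : ¬ (mand.length == 2 && !unk.isEmpty) = true := by simp [hM]
          have hc2 : ¬ ((unk.length : Int) == 2 - (mand.length : Int) && !unk.isEmpty) = true := by
            simp [hM2]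
          have hmark : (if (((mand.length : Int)) == 2) = true then (2:Int)
              else if (((unk.length : Int)) == 2 - (mand.length : Int)) = true then 1 else 0) = 0 := by
            have : ¬ ((mand.length : Int) = 2) := by omega
            simp [this, hM2]
          rw [if_neg hc1, if_neg hc2, hmark]
          rw [if_pos (by decide : (((0:Int) == 0) = true))]
          refine ⟨⟨⟨h1, h2⟩, ?_, ?_⟩, ?_⟩
          · intro m hm hmP
            by_cases hmn : m = n
            · subst hmn
              exact Or.inr ⟨hM, hM2⟩
            · exact hNoop m hm (fun hmem => hmP ((hP1mem m).mpr ⟨hmem, hmn⟩))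
          · intro x hx; exact hPsub x ((hP1mem x).mp hx).1
          · intro hc; exact ⟨hc, fun x hx => (hP1mem x).mp hx⟩
  · -- n is not pending: B skips it, and A's step at n is a no-op
    have hPmem : n ∉ P := fun h => hPn (List.elem_eq_true_of_mem h)
    have hnoop := hNoop n hn hPmem
    have hA := pvNodeA_noop E incA sa c n (hIA n hn) hnoop
    simp only [pvNodeB, hPn]
    rw [hA]
    simp only [Bool.false_eq_true, if_false]
    refine ⟨⟨⟨h1, h2⟩, hNoop, hPsub⟩, ?_⟩
    intro hc
    refine ⟨hc, fun x hx => ⟨hx, ?_⟩⟩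
    rintro rfl
    exact hPmem hx

-- a whole scan: the relation is preserved; if A's pass reports no change, B's
-- pending set has been emptied
theorem pv_pass_sim (E : List (Int × Int)) (allN : List Int) (ns : PySem.Set Int)
    (incA incB : PySem.Dict Int (List (Int × Int)))
    (hns : ns = PySem.Set.ofList allN)
    (hIA : ∀ n ∈ allN, incA.getD n [] = pvInc E n)
    (hIB : ∀ n ∈ allN, incB.getD n [] = pvInc E n)
    (l : List Int) (hl : ∀ n ∈ l, n ∈ allN)
    (sa : PySem.Dict (Int × Int) String) (sb : PySem.Dict (Int × Int) Int)
    (uc mc : PySem.Dict Int Int) (P : PySem.Set Int) (c : Bool)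
    (hR : pvRel E allN sa sb uc mc P)
    (hrem : c = false → ∀ x ∈ P, x ∈ l) :
    pvRel E allN (l.foldl (pvNodeA incA) (sa, c)).1
        (l.foldl (pvNodeB incB ns) (sb, uc, mc, P)).1
        (l.foldl (pvNodeB incB ns) (sb, uc, mc, P)).2.1
        (l.foldl (pvNodeB incB ns) (sb, uc, mc, P)).2.2.1
        (l.foldl (pvNodeB incB ns) (sb, uc, mc, P)).2.2.2
    ∧ ((l.foldl (pvNodeA incA) (sa, c)).2 = false →
        ∀ x, x ∉ (l.foldl (pvNodeB incB ns) (sb, uc, mc, P)).2.2.2) := by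
  induction l generalizing sa sb uc mc P c with
  | nil =>
    refine ⟨hR, ?_⟩
    intro hc x hx
    exact absurd (hrem hc x hx) (List.not_mem_nil)
  | cons x t ih =>
    have hx : x ∈ allN := hl x (by simp)
    have hstep := pv_node_sim E allN ns incA incB hns hIA hIB x hx sa sb uc mc P c hR
    simp only [List.foldl_cons]
    have eA : pvNodeA incA (sa, c) x = ((pvNodeA incA (sa, c) x).1, (pvNodeA incA (sa, c) x).2) := rfl
    have eB : pvNodeB incB ns (sb, uc, mc, P) x =
        ((pvNodeB incB ns (sb, uc, mc, P) x).1, (pvNodeB incB ns (sb, uc, mc, P) x).2.1,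
         (pvNodeB incB ns (sb, uc, mc, P) x).2.2.1, (pvNodeB incB ns (sb, uc, mc, P) x).2.2.2) := rfl
    rw [eA, eB]
    refine ih (fun n hn => hl n (List.mem_cons_of_mem x hn)) _ _ _ _ _ _ hstep.1 ?_
    intro hc' y hy
    obtain ⟨hc0, hsh⟩ := hstep.2 hc'
    obtain ⟨hyP, hyx⟩ := hsh y hy
    have := hrem hc0 y hyP
    simp at this
    tauto

-- once the pending set is empty, B's loop is the identity
theorem pvLoopB_empty (inc : PySem.Dict Int (List (Int × Int))) (ns : PySem.Set Int)
    (nodes : List Int) (fuel : Nat)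
    (t : PySem.Dict (Int × Int) Int × PySem.Dict Int Int × PySem.Dict Int Int × PySem.Set Int)
    (h : t.2.2.2.isEmpty = true) :
    pvLoopB inc ns nodes fuel t = t := by
  cases fuel with
  | zero => rfl
  | succ f => simp [pvLoopB, h]

-- the loops in lockstep: with any common fuel the final statuses correspond
theorem pv_loop_sim (E : List (Int × Int)) (allN : List Int) (ns : PySem.Set Int)
    (incA incB : PySem.Dict Int (List (Int × Int)))
    (hns : ns = PySem.Set.ofList allN)
    (hIA : ∀ n ∈ allN, incA.getD n [] = pvInc E n)
    (hIB : ∀ n ∈ allN, incB.getD n [] = pvInc E n)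
    (fuel : Nat)
    (sa : PySem.Dict (Int × Int) String) (sb : PySem.Dict (Int × Int) Int)
    (uc mc : PySem.Dict Int Int) (P : PySem.Set Int)
    (hR : pvRel E allN sa sb uc mc P) :
    ∀ e ∈ E,
      ((pvLoopA incA allN fuel sa).getD e "" = "unknown"
        ∧ (pvLoopB incB ns allN fuel (sb, uc, mc, P)).1.getD e 0 = 0)
    ∨ ((pvLoopA incA allN fuel sa).getD e "" = "mandatory"
        ∧ (pvLoopB incB ns allN fuel (sb, uc, mc, P)).1.getD e 0 = 1)
    ∨ ((pvLoopA incA allN fuel sa).getD e "" = "forbidden"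
        ∧ (pvLoopB incB ns allN fuel (sb, uc, mc, P)).1.getD e 0 = 2) := by
  induction fuel generalizing sa sb uc mc P with
  | zero => exact hR.1.1
  | succ fuel ih =>
    by_cases hP : P.isEmpty = true
    · -- B stops; all nodes are no-ops for A, so A's pass reports no change and stops too
      have hPempty : ∀ x, x ∉ P := by
        intro x hx
        rw [List.isEmpty_iff] at hP
        rw [hP] at hx
        exact List.not_mem_nil hx
      have hnoop : ∀ n ∈ allN, pvNoop E sa n := fun n hn => hR.2.1 n hn (hPempty n)
      simp only [pvLoopA, pvLoopB]
      rw [if_pos hP]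
      rw [show pvPassA incA allN (sa, false) = (sa, false) from
        pvPassA_noop E incA allN sa false hIA hnoop]
      simp only [Bool.false_eq_true, if_false]
      exact hR.1.1
    · -- both run one scan
      have hpass := pv_pass_sim E allN ns incA incB hns hIA hIB allN (fun n hn => hn)
        sa sb uc mc P false hR (fun _ x hx => hR.2.2 x hx)
      simp only [pvLoopA, pvLoopB]
      rw [if_neg hP]
      cases hb : (pvPassA incA allN (sa, false)).2 with
      | true =>
        rw [if_pos rfl]
        have eB : pvPassB incB ns allN (sb, uc, mc, P) =
            ((pvPassB incB ns allN (sb, uc, mc, P)).1,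
             (pvPassB incB ns allN (sb, uc, mc, P)).2.1,
             (pvPassB incB ns allN (sb, uc, mc, P)).2.2.1,
             (pvPassB incB ns allN (sb, uc, mc, P)).2.2.2) := rfl
        rw [eB]
        exact ih _ _ _ _ _ hpass.1
      | false =>
        simp only [Bool.false_eq_true, if_false]
        -- A returns its pass state; B's pending set is empty, so its loop halts too
        have hempty : (pvPassB incB ns allN (sb, uc, mc, P)).2.2.2.isEmpty = true := by
          rw [List.isEmpty_iff, List.eq_nil_iff_forall_not_mem]
          exact hpass.2 hb
        rw [pvLoopB_empty incB ns allN fuel _ hempty]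
        exact hpass.1.1.1

-- B's half/inc construction yields exactly A's incident lists
theorem pv_half_filter_gen (ns : PySem.Set Int) (m : Int) (hm : ns.contains m = true)
    (E : List (Int × Int)) : ∀ acc : List (Int × (Int × Int)),
    ((E.foldl (fun h e =>
        let h' := if ns.contains e.1 then h ++ [(e.1, e)] else h
        if !(e.2 == e.1) && ns.contains e.2 then h' ++ [(e.2, e)] else h') acc).filter
          (fun p => p.1 == m)).map (fun p => p.2)
      = ((acc.filter (fun p => p.1 == m)).map (fun p => p.2)) ++ pvInc E m := by
  induction E with
  | nil => intro acc; simp [pvInc]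
  | cons e E ih =>
    intro acc
    simp only [List.foldl_cons, ih]
    have hstep : (((let h' := if ns.contains e.1 then acc ++ [(e.1, e)] else acc
        if !(e.2 == e.1) && ns.contains e.2 then h' ++ [(e.2, e)] else h').filter
          (fun p => p.1 == m)).map (fun p => p.2))
        = ((acc.filter (fun p => p.1 == m)).map (fun p => p.2))
          ++ (if e.1 == m || e.2 == m then [e] else []) := by
      by_cases h1 : e.1 = m <;> by_cases h2 : e.2 = m
      · have h21 : e.2 = e.1 := by rw [h1, h2]
        simp_all
      · have h21 : ¬ e.2 = e.1 := by rw [h1]; exact h2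
        by_cases hc2 : ns.contains e.2 = true <;> simp_all
      · have h21 : ¬ e.2 = e.1 := by rw [h2]; exact fun h => h1 h.symm
        by_cases hc1 : ns.contains e.1 = true <;> simp_all
      · by_cases hc1 : ns.contains e.1 = true <;> by_cases hc2 : ns.contains e.2 = true <;>
          by_cases h21 : e.2 = e.1 <;> simp_all
    rw [hstep]
    simp [pvInc, List.filter_cons]
    by_cases hp : (e.1 == m || e.2 == m) = true <;> simp_all

-- ===== VERDICT (by name: the statement is the Claim_ definition above) =====
theorem mandatory_by_degree_propagation_spec : Claim_equal_mandatory_by_degree_propagation := by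
  intro nodes adj edges _
  unfold Spec_mandatory_by_degree_propagation
  simp only [mandatory_by_degree_propagation, mandatory_by_degree_propagation_alt]
  set E : List (Int × Int) := PySem.Set.ofList (edges.map (fun p => pvNorm p.1 p.2)) with hE
  have hnorm : edges.foldl (fun s p => PySem.Set.add s (pvNorm p.1 p.2)) PySem.Set.empty = E := by
    rw [hE, PySem.Set.ofList_eq_foldl, List.foldl_map]; rfl
  rw [hnorm]
  set ns : PySem.Set Int := PySem.Set.ofList nodes with hns
  -- incident dicts
  set incA := nodes.foldl
      (fun d n => d.insert n (E.filter (fun e => e.1 == n || e.2 == n))) PySem.Dict.empty with hincA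
  have hIA : ∀ n ∈ nodes, incA.getD n [] = pvInc E n := by
    intro n hn
    rw [hincA, pv_getD_foldl_insert_fn (fun n => E.filter (fun e => e.1 == n || e.2 == n))]
    simp [hn, pvInc]
  have hcontains : ∀ m ∈ nodes, ns.contains m = true := by
    intro m hm
    rw [hns]
    exact List.contains_iff_mem.mpr ((PySem.Set.mem_ofList nodes m).mpr hm)
  set half := E.foldl (fun h e =>
      let h' := if ns.contains e.1 then h ++ [(e.1, e)] else h
      if !(e.2 == e.1) && ns.contains e.2 then h' ++ [(e.2, e)] else h') [] with hhalf
  set inc0 := nodes.foldl (fun d n => d.insert n ([] : List (Int × Int))) PySem.Dict.empty with hinc0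
  set incB := half.foldl (fun d p => d.modify p.1 [] (fun l => l ++ [p.2])) inc0 with hincB
  have hIB : ∀ n ∈ nodes, incB.getD n [] = pvInc E n := by
    intro n hn
    rw [hincB, PySem.Dict.getD_foldl_modify_append]
    rw [hinc0, pv_getD_foldl_insert_const]
    rw [hhalf, pv_half_filter_gen ns n (hcontains n hn) E []]
    simp [hn]
  -- initial relation
  set sa0 := E.foldl (fun d e => d.insert e "unknown")
    (PySem.Dict.empty : PySem.Dict (Int × Int) String) with hsa0
  set sb0 := E.foldl (fun d e => d.insert e 0)
    (PySem.Dict.empty : PySem.Dict (Int × Int) Int) with hsb0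
  set uc0 := nodes.foldl (fun d n => d.insert n ((incB.getD n []).length : Int))
    (PySem.Dict.empty : PySem.Dict Int Int) with huc0
  set mc0 := nodes.foldl (fun d n => d.insert n (0 : Int))
    (PySem.Dict.empty : PySem.Dict Int Int) with hmc0
  have hsa0D : ∀ e ∈ E, sa0.getD e "" = "unknown" := by
    intro e he; rw [hsa0, pv_getD_foldl_insert_const]; simp [he]
  have hInv0 : pvInv E nodes sa0 sb0 uc0 mc0 := by
    constructor
    · intro e he
      left
      refine ⟨hsa0D e he, ?_⟩
      rw [hsb0, pv_getD_foldl_insert_const]; simp [he]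
    · intro n hn
      have hfu : (pvInc E n).filter (fun e => sa0.getD e "" == "unknown") = pvInc E n := by
        apply List.filter_eq_self.mpr
        intro e he
        simp [hsa0D e (List.mem_of_mem_filter he)]
      have hfm : (pvInc E n).filter (fun e => sa0.getD e "" == "mandatory") = [] := by
        apply List.filter_eq_nil_iff.mpr
        intro e he
        simp [hsa0D e (List.mem_of_mem_filter he)]
      constructor
      · rw [huc0, pv_getD_foldl_insert_fn (fun n => ((incB.getD n []).length : Int))]
        rw [hfu]
        simp [hn, hIB n hn]
      · rw [hmc0, pv_getD_foldl_insert_const, hfm]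
        simp [hn]
  have hR0 : pvRel E nodes sa0 sb0 uc0 mc0 (PySem.Set.ofList nodes) := by
    refine ⟨hInv0, ?_, ?_⟩
    · intro m hm hmP
      exact absurd ((PySem.Set.mem_ofList nodes m).mpr hm) hmP
    · intro x hx
      exact (PySem.Set.mem_ofList nodes x).mp hx
  -- run the simulation
  have hfin := pv_loop_sim E nodes ns incA incB hns hIA hIB (edges.length + 1)
    sa0 sb0 uc0 mc0 (PySem.Set.ofList nodes) hR0
  -- final filters agree pointwise
  have hmandF : E.filter (fun e => (pvLoopA incA nodes (edges.length + 1) sa0).getD e "" == "mandatory")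
      = E.filter (fun e => (pvLoopB incB ns nodes (edges.length + 1) (sb0, uc0, mc0, PySem.Set.ofList nodes)).1.getD e 0 == 1) := by
    apply List.filter_congr
    intro e he
    rcases hfin e he with ⟨ha, hb⟩ | ⟨ha, hb⟩ | ⟨ha, hb⟩ <;> simp [ha, hb]
  have hforbF : E.filter (fun e => (pvLoopA incA nodes (edges.length + 1) sa0).getD e "" == "forbidden")
      = E.filter (fun e => (pvLoopB incB ns nodes (edges.length + 1) (sb0, uc0, mc0, PySem.Set.ofList nodes)).1.getD e 0 == 2) := by
    apply List.filter_congr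
    intro e he
    rcases hfin e he with ⟨ha, hb⟩ | ⟨ha, hb⟩ | ⟨ha, hb⟩ <;> simp [ha, hb]
  rw [hmandF, hforbF]
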